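-- pv_equiv track=rewrite | github.com/ppfish45/2019-nCov-data-update | tools/common.py | find_plain_code
-- ===== SOURCE A (Python) =====
-- def is_alpha(text):
--     order = ord(text)
--     if ord("a") <= order <= ord("z"):
--         return True
--     if ord("A") <= order <= ord("Z"):
--         return True
--     return False
--
-- def find_plain_code(text):
--     result = []
--     last = -1
--
--     text = text + "#"
--
--     for i, ch in enumerate(text):
--         if is_alpha(ch) or ch.isdigit() or ch == "-":
--             if last == -1:
--                 last = i
--         else:
--             if last != -1:
--                 result.append(text[last:i].upper())
--                 last = -1
--
--     return result
-- ===== SOURCE B (Python) =====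
-- from itertools import groupby
--
-- def _pred(ch):
--     return ("a" <= ch <= "z") or ("A" <= ch <= "Z") or ch.isdigit() or ch == "-"
--
-- def find_plain_code(text):
--     return ["".join(g).upper() for k, g in groupby(text, key=_pred) if k]
-- ===== Notes on version B (the rewrite author's own statement) =====
-- stated objective: idiomatic
-- what changed: Replaces the index/sentinel state machine (append '#', track a 'last' start index, slice on run end) with a single groupby over the characters that joins and uppercases each maximal run satisfying the same predicate.
import Mathlib
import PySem

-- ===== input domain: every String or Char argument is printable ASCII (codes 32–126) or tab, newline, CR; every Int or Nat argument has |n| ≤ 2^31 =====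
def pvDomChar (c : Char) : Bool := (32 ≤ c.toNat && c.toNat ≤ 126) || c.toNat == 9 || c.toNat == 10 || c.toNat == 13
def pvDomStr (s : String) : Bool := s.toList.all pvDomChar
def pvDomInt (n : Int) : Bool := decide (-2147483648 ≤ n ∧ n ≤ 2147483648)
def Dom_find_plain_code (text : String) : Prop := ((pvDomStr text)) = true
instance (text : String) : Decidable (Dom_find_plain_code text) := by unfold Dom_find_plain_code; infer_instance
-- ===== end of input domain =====

-- B replaces A's sentinel-and-index state machine by grouping maximal runs (groupby); equal return values proved below.

-- ===== PORT A =====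
-- helper is_alpha from the module
def pvIsAlpha (c : Char) : Bool :=
  let order := c.toNat
  if 97 ≤ order ∧ order ≤ 122 then true
  else if 65 ≤ order ∧ order ≤ 90 then true
  else false

-- the 'for i, ch in enumerate(text)' loop, state (result, last)
def pvLoopA (t : List Char) : List Char → Nat → List String → Int → List String
  | [], _, result, _ => result
  | ch :: rest, i, result, last =>
    if pvIsAlpha ch || PySem.Chars.isdigit ch || ch == '-' then
      pvLoopA t rest (i + 1) result (if last == -1 then (i : Int) else last)
    else
      if last != -1 then
        pvLoopA t rest (i + 1)
          (result ++ [String.ofList (PySem.Chars.upper (PySem.List.slice t (some last) (some (i : Int))))])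
          (-1)
      else
        pvLoopA t rest (i + 1) result last

def find_plain_code (text : String) : List String :=
  let t := (text ++ "#").toList
  pvLoopA t t 0 [] (-1)

-- ===== PORT B =====
-- the predicate _pred of Source B
def pvPredB (c : Char) : Bool :=
  ('a' ≤ c ∧ c ≤ 'z') || ('A' ≤ c ∧ c ≤ 'Z') || PySem.Chars.isdigit c || c == '-'

-- groupby(text, key=_pred), keeping (joined, uppercased) the groups whose key is true
def pvRunsB : List Char → List String
  | [] => []
  | c :: cs =>
    if pvPredB c then
      String.ofList (PySem.Chars.upper (c :: cs.takeWhile pvPredB)) :: pvRunsB (cs.dropWhile pvPredB)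
    else
      pvRunsB cs
termination_by cs => cs.length
decreasing_by
  · simpa using Nat.lt_succ_of_le (List.length_dropWhile_le pvPredB cs)
  · simp

def find_plain_code_alt (text : String) : List String :=
  pvRunsB text.toList

-- ===== PRECONDITION & SPEC =====
def Spec_find_plain_code (text : String) (out : List String) : Prop := out = find_plain_code_alt text
instance (text : String) (out : List String) : Decidable (Spec_find_plain_code text out) := by unfold Spec_find_plain_code; infer_instance

-- ===== CLAIM (what is proved, stated in full; the proofs are below) =====
def Claim_equal_find_plain_code : Prop := ∀ (text : String), Dom_find_plain_code text → Spec_find_plain_code text (find_plain_code text)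

-- ===== LEMMAS AND PROOFS =====

-- A's loop condition is Source B's predicate
theorem pvPredB_eq (c : Char) :
    (pvIsAlpha c || PySem.Chars.isdigit c || c == '-') = pvPredB c := by
  have e1 : ('a' ≤ c ∧ c ≤ 'z') ↔ (97 ≤ c.toNat ∧ c.toNat ≤ 122) := by
    rw [Char.le_def, Char.le_def, UInt32.le_iff_toNat_le, UInt32.le_iff_toNat_le]
    simp
  have e2 : ('A' ≤ c ∧ c ≤ 'Z') ↔ (65 ≤ c.toNat ∧ c.toNat ≤ 90) := by
    rw [Char.le_def, Char.le_def, UInt32.le_iff_toNat_le, UInt32.le_iff_toNat_le]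
    simp
  simp only [pvPredB, pvIsAlpha]
  by_cases h1 : 97 ≤ c.toNat ∧ c.toNat ≤ 122 <;>
    by_cases h2 : 65 ≤ c.toNat ∧ c.toNat ≤ 90 <;>
      simp [e1, e2, h1, h2]

theorem pvPredB_hash : pvPredB '#' = false := by decide

-- pvRunsB peels a whole maximal run at once
theorem pvRunsB_run (c : Char) (cur cs : List Char)
    (h : (c :: cur).all pvPredB) :
    pvRunsB (c :: (cur ++ cs)) =
      String.ofList (PySem.Chars.upper (c :: (cur ++ cs.takeWhile pvPredB))) ::
        pvRunsB (cs.dropWhile pvPredB) := by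
  simp only [List.all_cons, Bool.and_eq_true] at h
  have ht : cur.takeWhile pvPredB = cur := List.takeWhile_eq_self_iff.mpr (by
    intro x hx; exact List.all_eq_true.mp h.2 x hx)
  have hd : cur.dropWhile pvPredB = [] := List.dropWhile_eq_nil_iff.mpr (by
    intro x hx; exact List.all_eq_true.mp h.2 x hx)
  rw [pvRunsB]
  simp [h.1, List.takeWhile_append, List.dropWhile_append, ht, hd]

-- a trailing non-matching sentinel does not change the runs
theorem pvRunsB_append_sentinel (xs : List Char) :
    pvRunsB (xs ++ ['#']) = pvRunsB xs := by
  induction xs using pvRunsB.induct with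
  | case1 => rw [pvRunsB]; simp [pvPredB_hash, pvRunsB]
  | case2 c cs hc ih =>
      rw [List.cons_append, pvRunsB, pvRunsB]
      simp only [hc, if_true, List.takeWhile_append, List.dropWhile_append]
      by_cases he : (cs.dropWhile pvPredB).isEmpty
      · have hnil : cs.dropWhile pvPredB = [] := by simpa using he
        have hself : cs.takeWhile pvPredB = cs := List.takeWhile_eq_self_iff.mpr
          (List.dropWhile_eq_nil_iff.mp hnil)
        simp [hnil, hself, pvPredB_hash, pvRunsB]
      · have hnil : ¬ cs.dropWhile pvPredB = [] := by simpa using he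
        have hlen : ¬ (cs.takeWhile pvPredB).length = cs.length := by
          intro hl
          have heq : cs.takeWhile pvPredB = cs := (List.takeWhile_prefix _).eq_of_length hl
          exact hnil (List.dropWhile_eq_nil_iff.mpr (List.takeWhile_eq_self_iff.mp heq))
        simp [he, hlen, ih]
  | case3 c cs hc ih =>
      rw [List.cons_append, pvRunsB, pvRunsB]
      simp [hc, ih]

-- loop invariant for A's state machine: cur is the pending run t[last:i]
theorem pvLoopA_eq (u : List Char) (cs : List Char) :
    ∀ (i : Nat) (res : List String) (cur : List Char),
      i ≤ (u ++ ['#']).length → (u ++ ['#']).drop i = cs → cur.length ≤ i →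
      ((u ++ ['#']).drop (i - cur.length)).take cur.length = cur →
      cur.all pvPredB →
      pvLoopA (u ++ ['#']) cs i res
          (if cur.isEmpty then -1 else ((i - cur.length : Nat) : Int))
        = res ++ pvRunsB (cur ++ cs) := by
  induction cs with
  | nil =>
      intro i res cur hi hdrop hlen htake hall
      have hlenle : (u ++ ['#']).length ≤ i := by
        by_contra hlt
        have : (u ++ ['#']).drop i ≠ [] := by
          simp only [ne_eq, List.drop_eq_nil_iff]
          simp only [List.length_append, List.length_cons, List.length_nil] at hlt ⊢
          omega
        exact this hdrop
      have hilen : i = u.length + 1 := by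
        have h := le_antisymm hi hlenle; simpa using h
      rcases cur with _ | ⟨c0, cur'⟩
      · simp [pvLoopA, pvRunsB]
      · exfalso
        -- the pending run would have to contain the final '#', which is not matched
        set n := (c0 :: cur').length with hn
        have hn1 : 1 ≤ n := by rw [hn]; simp
        have hdroplen : ((u ++ ['#']).drop (i - n)).length = n := by
          simp [hilen]; omega
        have hcur : (u ++ ['#']).drop (i - n) = c0 :: cur' := by
          rw [← htake, List.take_of_length_le (le_of_eq hdroplen)]
        have hkle : i - n ≤ u.length := by omega
        have hmem : '#' ∈ (u ++ ['#']).drop (i - n) := by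
          rw [List.drop_append_of_le_length hkle]; simp
        rw [hcur] at hmem
        have := List.all_eq_true.mp hall '#' hmem
        simp [pvPredB_hash] at this
  | cons c rest ih =>
      intro i res cur hi hdrop hlen htake hall
      have hlt : i < (u ++ ['#']).length := by
        by_contra hge
        have : (u ++ ['#']).drop i = [] := List.drop_eq_nil_iff.mpr (by omega)
        rw [this] at hdrop; simp at hdrop
      have hti : (u ++ ['#'])[i]? = some c := by
        have h0 : ((u ++ ['#']).drop i)[0]? = some c := by rw [hdrop]; rfl
        rwa [List.getElem?_drop, Nat.add_zero] at h0
      have hdrop1 : (u ++ ['#']).drop (i + 1) = rest := by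
        have := congrArg List.tail hdrop
        rwa [List.tail_drop] at this
      rw [pvLoopA, pvPredB_eq c]
      by_cases hc : pvPredB c = true
      · rcases cur with _ | ⟨c0, cur'⟩
        · -- a run starts at i
          have h1 : ((u ++ ['#']).drop (i + 1 - ([c].length))).take ([c].length) = [c] := by
            simp only [List.length_cons, List.length_nil, Nat.add_sub_cancel]
            rw [List.take_one, List.head?_drop, hti]; rfl
          have := ih (i + 1) res [c] (by omega) hdrop1 (by simp) h1 (by simp [hc])
          simp only [List.isEmpty_cons, List.length_cons, List.length_nil,
            Nat.add_sub_cancel, Bool.false_eq_true, if_false, List.cons_append,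
            List.nil_append] at this
          simpa [hc] using this
        · -- the run continues
          set n := (c0 :: cur').length with hn
          have hn1 : 1 ≤ n := by rw [hn]; simp
          have hL : ((c0 :: cur') ++ [c]).length = n + 1 := by simp [hn]
          have hne : (((i - n : Nat) : Int) == -1) = false := by simp
          have h1 : ((u ++ ['#']).drop (i + 1 - (n + 1))).take (n + 1)
              = (c0 :: cur') ++ [c] := by
            have hidx : i + 1 - (n + 1) = i - n := by omega
            rw [hidx, List.take_add_one, htake, List.getElem?_drop]
            have h2 : i - n + n = i := by omega
            rw [h2, hti]; rfl
          have := ih (i + 1) res ((c0 :: cur') ++ [c]) (by omega) hdrop1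
            (by rw [hL]; omega) (by rw [hL]; exact h1)
            (by simp only [List.all_append, hall, List.all_cons, List.all_nil, hc]; simp)
          rw [hL] at this
          simp only [List.cons_append, List.isEmpty_cons, Bool.false_eq_true, if_false,
            List.nil_append, List.append_assoc] at this ⊢
          have hidx : i + 1 - (n + 1) = i - n := by omega
          rw [hidx] at this
          simp only [hc, if_true, hne, Bool.false_eq_true, if_false]
          simpa using this
      · rcases cur with _ | ⟨c0, cur'⟩
        · -- no pending run, separator: state unchanged
          have := ih (i + 1) res [] (by omega) hdrop1 (by simp) (by simp) (by simp)
          simp only [List.isEmpty_nil, if_true, List.nil_append] at this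
          have hrw : pvRunsB (c :: rest) = pvRunsB rest := by rw [pvRunsB]; simp [hc]
          simp [hc, this, hrw]
        · -- pending run is flushed: the slice is exactly cur
          set n := (c0 :: cur').length with hn
          have hslice : PySem.List.slice (u ++ ['#']) (some ((i - n : Nat) : Int))
              (some (i : Int)) = c0 :: cur' := by
            rw [PySem.List.slice_natCast]
            have h2 : i - (i - n) = n := by omega
            rw [h2, htake]
          have hne : (((i - n : Nat) : Int) != -1) = true := by simp
          have := ih (i + 1) (res ++ [String.ofList (PySem.Chars.upper (c0 :: cur'))]) []
            (by omega) hdrop1 (by simp) (by simp) (by simp)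
          simp only [List.isEmpty_nil, if_true, List.nil_append] at this
          have hrun := pvRunsB_run c0 cur' (c :: rest) hall
          rw [List.takeWhile_cons_of_neg (by simp [hc]),
            List.dropWhile_cons_of_neg (by simp [hc])] at hrun
          simp only [List.isEmpty_cons, Bool.false_eq_true, if_false, hc, hne, if_true]
          rw [hslice, this, List.cons_append, hrun]
          have hrw : pvRunsB (c :: rest) = pvRunsB rest := by rw [pvRunsB]; simp [hc]
          simp [hrw]

-- ===== VERDICT (by name: the statement is the Claim_ definition above) =====
theorem find_plain_code_spec : Claim_equal_find_plain_code := by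
  intro text _
  unfold Spec_find_plain_code find_plain_code find_plain_code_alt
  have h := pvLoopA_eq text.toList ((text.toList ++ ['#']).drop 0) 0 [] []
      (by simp) rfl (by simp) (by simp) (by simp)
  simp only [List.isEmpty_nil, if_true, List.drop_zero, List.nil_append] at h
  have ht : (text ++ "#").toList = text.toList ++ ['#'] := by simp
  rw [ht, h, pvRunsB_append_sentinel]
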